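-- pv_equiv track=rewrite | github.com/danielzak555/magshimim_all_hw | Network/Semester B/homework_8/et_come_home.py | decode_even_positions
-- ===== SOURCE A (Python) =====
-- A_IN_ASCII = 97
--
-- def decode_even_positions(data, rotation):
--     """
--     Decodes characters at even positions in a string by rotating them alphabetically.
--
--     :param data: The input string to decode.
--     :type data: str
--     :param rotation: The number of positions to rotate the characters.
--     :type rotation: int
--     :return: The string with characters at even positions decoded.
--     :rtype: str
--     """
--     output = ""
--     for i in range(len(data)):
--         char = data[i]
--         if i % 2 == 0 and char.isalpha():
--             output += chr((ord(char) - A_IN_ASCII - rotation) % 26 + A_IN_ASCII)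
--         else:
--             output += char
--     return output
-- ===== SOURCE B (Python) =====
-- A_IN_ASCII = 97
--
-- def decode_even_positions(data, rotation):
--     # Pairwise consumption: take chars two at a time from one iterator;
--     # rotate the first of each pair, keep the second as-is.
--     out = []
--     it = iter(data)
--     for char in it:
--         if char.isalpha():
--             out.append(chr((ord(char) - A_IN_ASCII - rotation) % 26 + A_IN_ASCII))
--         else:
--             out.append(char)
--         out.append(next(it, ''))
--     return "".join(out)
-- ===== Notes on version B (the rewrite author's own statement) =====
-- stated objective: alternative
-- what changed: Replaces the index loop with parity test and repeated string concatenation by index-free pairwise consumption of one iterator (rotate the first of each pair, copy the second), collected in a list and joined once.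
import Mathlib
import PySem

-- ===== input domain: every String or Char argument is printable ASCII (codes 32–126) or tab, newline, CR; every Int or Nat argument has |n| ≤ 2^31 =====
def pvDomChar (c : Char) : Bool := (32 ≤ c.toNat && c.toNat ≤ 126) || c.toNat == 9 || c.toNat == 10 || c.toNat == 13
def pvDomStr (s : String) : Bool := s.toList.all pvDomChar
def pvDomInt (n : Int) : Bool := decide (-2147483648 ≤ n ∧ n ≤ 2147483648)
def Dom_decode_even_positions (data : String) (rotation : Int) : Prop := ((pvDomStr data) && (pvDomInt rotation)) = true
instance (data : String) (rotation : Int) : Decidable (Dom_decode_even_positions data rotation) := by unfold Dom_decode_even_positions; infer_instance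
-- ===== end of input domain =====

-- B replaces A's index loop (parity test on i, repeated string concatenation) by index-free
-- pairwise consumption of the character list; return values proved equal on the whole printable domain.

-- ===== PORT A =====
-- literal port of A: for i in range(len(data)): rotate data[i] if i even and alpha, append
def decode_even_positions (data : String) (rotation : Int) : String :=
  String.mk <|
    (PySem.List.pyRange 0 (PySem.Str.len data) 1).foldl
      (fun output i =>
        match PySem.List.pyGet? data.toList i with
        | none => output
        | some char =>
          if PySem.Int.mod i 2 == 0 && PySem.Chars.isalpha char then
            output ++ [Char.ofNat (PySem.Int.mod ((char.toNat : Int) - 97 - rotation) 26 + 97).toNat]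
          else
            output ++ [char])
      []

-- ===== PORT B =====
-- pairwise consumption: rotate the first char of each pair, keep the second (next(it, '') at the odd end)
def pvPairs (rotation : Int) : List Char → List Char
  | [] => []
  | [char] =>
      [if PySem.Chars.isalpha char then
         Char.ofNat (PySem.Int.mod ((char.toNat : Int) - 97 - rotation) 26 + 97).toNat
       else char]
  | char :: nxt :: rest =>
      (if PySem.Chars.isalpha char then
         Char.ofNat (PySem.Int.mod ((char.toNat : Int) - 97 - rotation) 26 + 97).toNat
       else char) :: nxt :: pvPairs rotation rest

def decode_even_positions_alt (data : String) (rotation : Int) : String :=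
  String.mk (pvPairs rotation data.toList)

-- ===== PRECONDITION & SPEC =====
def Spec_decode_even_positions (data : String) (rotation : Int) (out : String) : Prop := out = decode_even_positions_alt data rotation
instance (data : String) (rotation : Int) (out : String) : Decidable (Spec_decode_even_positions data rotation out) := by unfold Spec_decode_even_positions; infer_instance

-- ===== CLAIM (what is proved, stated in full; the proofs are below) =====
def Claim_equal_decode_even_positions : Prop := ∀ (data : String) (rotation : Int), Dom_decode_even_positions data rotation → Spec_decode_even_positions data rotation (decode_even_positions data rotation)

-- ===== LEMMAS AND PROOFS =====

-- A's loop body once the index is known to be in range (pair (index, char))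
def pvStep (rotation : Int) (output : List Char) (p : Int × Char) : List Char :=
  if PySem.Int.mod p.1 2 == 0 && PySem.Chars.isalpha p.2 then
    output ++ [Char.ofNat (PySem.Int.mod ((p.2.toNat : Int) - 97 - rotation) 26 + 97).toNat]
  else
    output ++ [p.2]

lemma pvFoldEnum (rotation : Int) (l : List Char) :
    ∀ (s : Int) (acc : List Char), s % 2 = 0 →
      (PySem.List.enumerate l s).foldl (pvStep rotation) acc = acc ++ pvPairs rotation l := by
  induction l using pvPairs.induct with
  | case1 => intro s acc hs; simp [PySem.List.enumerate_nil, pvPairs]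
  | case2 char =>
      intro s acc hs
      have hd : 2 ∣ s := by omega
      simp [PySem.List.enumerate_cons, PySem.List.enumerate_nil, pvPairs, pvStep, hd]
      split_ifs <;> simp
  | case3 char nxt rest ih =>
      intro s acc hs
      have hd : 2 ∣ s := by omega
      have hd1 : ¬ (2 ∣ (s + 1)) := by omega
      simp [PySem.List.enumerate_cons, pvPairs, pvStep, hd, hd1]
      rw [ih _ _ (by omega)]
      split_ifs <;> simp

lemma pvA_eq (data : String) (rotation : Int) :
    decode_even_positions data rotation = decode_even_positions_alt data rotation := by
  unfold decode_even_positions decode_even_positions_alt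
  congr 1
  set l := data.toList with hl
  have hcong :
      (PySem.List.pyRange 0 (PySem.Str.len data) 1).foldl
        (fun output i =>
          match PySem.List.pyGet? l i with
          | none => output
          | some char =>
            if PySem.Int.mod i 2 == 0 && PySem.Chars.isalpha char then
              output ++ [Char.ofNat (PySem.Int.mod ((char.toNat : Int) - 97 - rotation) 26 + 97).toNat]
            else
              output ++ [char]) [] =
      (PySem.List.pyRange 0 (PySem.Str.len data) 1).foldl
        (fun output i => pvStep rotation output (i, PySem.List.pyGetD l i ' ')) [] := by
    apply PySem.List.foldl_congr_mem
    intro acc i hi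
    rw [PySem.List.mem_pyRange_one] at hi
    obtain ⟨k, rfl⟩ : ∃ k : Nat, i = (k : Int) := ⟨i.toNat, by omega⟩
    have hk : k < l.length := by
      have := hi.2
      simp [PySem.Str.len_eq, hl] at this ⊢
      omega
    simp [PySem.List.pyGet?_natCast, PySem.List.pyGetD, PySem.List.pyGet?_natCast,
      List.getElem?_eq_getElem hk, pvStep]
  rw [hcong]
  have hlen : PySem.Str.len data = PySem.List.len l := by simp [hl]
  rw [hlen, ← List.foldl_map, ← PySem.List.enumerate_eq_map_pyRange l ' ']
  simpa using pvFoldEnum rotation l 0 [] (by norm_num)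

-- ===== VERDICT (by name: the statement is the Claim_ definition above) =====
theorem decode_even_positions_spec : Claim_equal_decode_even_positions := by
  intro data rotation _
  unfold Spec_decode_even_positions
  exact pvA_eq data rotation
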